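-- pv_equiv track=rewrite | github.com/suno09/LearnPython | codewars/square_sums2.py | square_sums
-- ===== SOURCE A (Python) =====
-- from math import sqrt
-- from collections import defaultdict
--
-- def square_sums(num):
--     """ generate dict for get all numbers graph """
--     sequences = defaultdict(list)
--
--     for n in range(num, 0, -1):
--         max_square = int(sqrt(n + num)) ** 2
--         while max_square > n:
--             diff = max_square - n
--             if diff != n:
--                 sequences[n].append(max_square - n)
--             max_square = max_square - int(sqrt(max_square)) * 2 + 1
--
--     return sequences
-- ===== SOURCE B (Python) =====
-- from math import isqrt
-- from collections import defaultdict
--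
-- def square_sums(num):
--     """ generate dict for get all numbers graph """
--     buckets = defaultdict(list)
--     for r in range(isqrt(max(num + num, 0)), 1, -1):
--         s = r * r
--         for n in range(max(1, s - num), min(num, s - 1) + 1):
--             if s - n != n:
--                 buckets[n].append(s - n)
--     sequences = defaultdict(list)
--     for n in range(num, 0, -1):
--         if n in buckets:
--             sequences[n] = buckets[n]
--     return sequences
-- ===== Notes on version B (the rewrite author's own statement) =====
-- stated objective: alternative
-- what changed: B inverts A's traversal: instead of walking, for each n, the perfect squares in (n, n+num] downward with repeated float sqrt, B enumerates each perfect square s = r*r once (r descending), computes the window of partners n arithmetically and buckets s-n, then emits the buckets in descending key order; same O(num^1.5) pair count, no per-step sqrt.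
import Mathlib
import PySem

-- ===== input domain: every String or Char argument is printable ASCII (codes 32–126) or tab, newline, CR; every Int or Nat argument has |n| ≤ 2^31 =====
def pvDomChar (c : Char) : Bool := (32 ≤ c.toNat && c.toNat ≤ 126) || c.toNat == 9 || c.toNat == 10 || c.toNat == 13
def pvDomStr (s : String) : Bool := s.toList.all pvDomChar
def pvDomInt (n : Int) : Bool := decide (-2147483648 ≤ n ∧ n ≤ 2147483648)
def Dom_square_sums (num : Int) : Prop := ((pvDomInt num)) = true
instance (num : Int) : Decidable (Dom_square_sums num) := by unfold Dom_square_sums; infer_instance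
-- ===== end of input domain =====

-- B inverts A's traversal: it enumerates each perfect square s = r*r once (r
-- descending), computes the window of partners n for s arithmetically and buckets
-- s - n, then emits the buckets in descending key order; an alternative algorithm,
-- not claimed faster.

-- ===== PORT A =====
-- `int(sqrt(x))` is ported as `Int.sqrt x`: exact here, since every argument is a
-- nonnegative int ≤ 2^32, where the float sqrt floors to the integer square root.
-- The inner `while` loop of A, threading the defaultdict `sequences`; the conjunct
-- `1 ≤ n` in the guard is a totality guard only: every call site has n ≥ 1.
def aInnerD (n : Int) (ms : Int) (d : PySem.Dict Int (List Int)) :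
    PySem.Dict Int (List Int) :=
  if h : 1 ≤ n ∧ n < ms then
    aInnerD n (ms - Int.sqrt ms * 2 + 1)
      (if ms - n ≠ n then d.insert n (d.getD n [] ++ [ms - n]) else d)
  else d
termination_by ms.toNat
decreasing_by
  have hs : 0 < Int.sqrt ms := by
    have : 0 < ms.toNat := by omega
    unfold Int.sqrt
    exact_mod_cast Nat.sqrt_pos.mpr this
  omega

def square_sums (num : Int) : List (Int × List Int) :=
  ((PySem.List.pyRange num 0 (-1)).foldl
    (fun d n => aInnerD n (Int.sqrt (n + num) ^ 2) d)
    PySem.Dict.empty).items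

-- ===== PORT B =====
-- `math.isqrt` is ported as `Int.sqrt` (exact; the argument max(num+num, 0) is ≥ 0).
def square_sums_alt (num : Int) : List (Int × List Int) :=
  let buckets := (PySem.List.pyRange (Int.sqrt (max (num + num) 0)) 1 (-1)).foldl
    (fun b r =>
      let s := r * r
      (PySem.List.pyRange (max 1 (s - num)) (min num (s - 1) + 1) 1).foldl
        (fun b n => if s - n ≠ n then b.insert n (b.getD n [] ++ [s - n]) else b) b)
    PySem.Dict.empty
  ((PySem.List.pyRange num 0 (-1)).foldl
    (fun d n => if buckets.contains n then d.insert n (buckets.getD n []) else d)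
    PySem.Dict.empty).items

-- ===== PRECONDITION & SPEC =====
def Spec_square_sums (num : Int) (out : List (Int × List Int)) : Prop := out = square_sums_alt num
instance (num : Int) (out : List (Int × List Int)) : Decidable (Spec_square_sums num out) := by unfold Spec_square_sums; infer_instance

-- ===== CLAIM (what is proved, stated in full; the proofs are below) =====
def Claim_equal_square_sums : Prop := ∀ (num : Int), Dom_square_sums num → Spec_square_sums num (square_sums num)

-- ===== LEMMAS AND PROOFS =====

-- Pure-list version of A's inner while loop (the sequence of values appended for n).
def aList (n : Int) (ms : Int) : List Int :=
  if h : 1 ≤ n ∧ n < ms then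
    (if ms - n ≠ n then [ms - n] else []) ++ aList n (ms - Int.sqrt ms * 2 + 1)
  else []
termination_by ms.toNat
decreasing_by
  have hs : 0 < Int.sqrt ms := by
    have : 0 < ms.toNat := by omega
    unfold Int.sqrt
    exact_mod_cast Nat.sqrt_pos.mpr this
  omega

-- aInnerD appends aList onto the entry for n (creating it only if something is appended).
theorem aInnerD_eq_aList (n ms : Int) (d : PySem.Dict Int (List Int)) :
    aInnerD n ms d =
      if aList n ms = [] then d else d.insert n (d.getD n [] ++ aList n ms) := by
  fun_induction aInnerD n ms d with
  | case1 ms d h ih =>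
    rw [aList, dif_pos h]
    by_cases hd : ms - n ≠ n
    · simp only [dite_eq_ite, if_pos hd] at ih ⊢
      rw [ih]
      by_cases hr : aList n (ms - Int.sqrt ms * 2 + 1) = []
      · simp [hr]
      · have hne : (ms - n) :: aList n (ms - Int.sqrt ms * 2 + 1) ≠ [] := by simp
        simp only [List.singleton_append]
        rw [if_neg hr, if_neg hne, PySem.Dict.getD_insert_self,
          PySem.Dict.insert_insert_self]
        simp
    · simp only [dite_eq_ite, if_neg hd] at ih ⊢
      simpa using ih
  | case2 ms d h =>
    rw [aList, dif_neg h]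
    simp

-- Squares enumerated from ((r:ℤ))^2 downward, as a recursion on r.
def specList (n : Int) : Nat → List Int
  | 0 => []
  | r+1 => if n < ((r+1 : Nat) : ℤ)^2 then
      (if ((r+1 : Nat) : ℤ)^2 - n ≠ n then [((r+1 : Nat) : ℤ)^2 - n] else []) ++ specList n r
    else []

theorem aList_eq_specList (r : Nat) (n : Int) (hn : 1 ≤ n) :
    aList n (((r:ℤ))^2) = specList n r := by
  induction r with
  | zero =>
    rw [aList, dif_neg]
    · rfl
    · push_cast
      omega
  | succ r ih =>
    rw [specList]
    have hsq : Int.sqrt (((r+1 : Nat) : ℤ)^2) = ((r+1 : Nat) : ℤ) := by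
      rw [pow_two, Int.sqrt_eq, Int.natAbs_natCast]
    by_cases hlt : n < ((r+1 : Nat) : ℤ)^2
    · rw [aList, dif_pos ⟨hn, hlt⟩, hsq]
      have harg : ((r+1 : Nat) : ℤ)^2 - ((r+1 : Nat) : ℤ) * 2 + 1 = ((r : Nat) : ℤ)^2 := by
        push_cast
        ring
      rw [harg, ih, if_pos hlt]
    · rw [aList, dif_neg (by tauto), if_neg hlt]

-- B's bucket content for key n after the radii R, R-1, …, 2, 1 have been processed.
def gList (num n : Int) : Nat → List Int
  | 0 => []
  | r+1 =>
    (if max 1 (((r+1 : Nat) : ℤ) * ((r+1 : Nat) : ℤ) - num) ≤ n ∧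
        n < min num (((r+1 : Nat) : ℤ) * ((r+1 : Nat) : ℤ) - 1) + 1 ∧
        ((r+1 : Nat) : ℤ) * ((r+1 : Nat) : ℤ) - n ≠ n
     then [((r+1 : Nat) : ℤ) * ((r+1 : Nat) : ℤ) - n] else []) ++ gList num n r

-- Effect of B's inner window loop on one key of the bucket dictionary.
theorem inner_getD (s q : Int) (l : List Int) (hl : l.Nodup) :
    ∀ (b : PySem.Dict Int (List Int)),
    (l.foldl (fun b n => if s - n ≠ n then b.insert n (b.getD n [] ++ [s - n]) else b) b).getD q []
      = b.getD q [] ++ (if q ∈ l ∧ s - q ≠ q then [s - q] else []) := by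
  induction l with
  | nil => intro b; simp
  | cons n l ih =>
    intro b
    have hl' := List.nodup_cons.1 hl
    rw [List.foldl_cons]
    by_cases hnq : n = q
    · subst hnq
      rw [ih hl'.2]
      have hq : ¬ (n ∈ l ∧ s - n ≠ n) := fun h => hl'.1 h.1
      rw [if_neg hq, List.append_nil]
      by_cases hc : s - n ≠ n
      · rw [if_pos hc, PySem.Dict.getD_insert_self,
          if_pos ⟨List.mem_cons_self, hc⟩]
      · rw [if_neg hc, if_neg (fun h => hc h.2), List.append_nil]
    · have hstep : ∀ b' : PySem.Dict Int (List Int),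
          ((if s - n ≠ n then b'.insert n (b'.getD n [] ++ [s - n]) else b') : PySem.Dict Int (List Int)).getD q []
            = b'.getD q [] := by
        intro b'
        by_cases hc : s - n ≠ n
        · rw [if_pos hc, PySem.Dict.getD_insert, if_neg (fun h => hnq h.symm)]
        · rw [if_neg hc]
      rw [ih hl'.2, hstep]
      have hql : (q ∈ n :: l) ↔ (q ∈ l) := by
        rw [List.mem_cons]
        exact ⟨fun h => h.resolve_left (fun h' => hnq h'.symm), Or.inr⟩
      by_cases hm : q ∈ l ∧ s - q ≠ q
      · rw [if_pos hm, if_pos ⟨List.mem_cons_of_mem _ hm.1, hm.2⟩]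
      · rw [if_neg hm, if_neg (fun h => hm ⟨hql.1 h.1, h.2⟩)]

theorem inner_contains (s q : Int) (l : List Int) :
    ∀ (b : PySem.Dict Int (List Int)),
    (l.foldl (fun b n => if s - n ≠ n then b.insert n (b.getD n [] ++ [s - n]) else b) b).contains q
      = (b.contains q || decide (q ∈ l ∧ s - q ≠ q)) := by
  induction l with
  | nil => intro b; simp
  | cons n l ih =>
    intro b
    rw [List.foldl_cons, ih]
    by_cases hnq : n = q
    · subst hnq
      by_cases hc : s - n ≠ n
      · rw [if_pos hc, PySem.Dict.contains_insert_self]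
        have h1 : decide (n ∈ n :: l ∧ s - n ≠ n) = true :=
          decide_eq_true ⟨List.mem_cons_self, hc⟩
        rw [h1]
        simp
      · rw [if_neg hc]
        have h1 : decide (n ∈ n :: l ∧ s - n ≠ n) = false :=
          decide_eq_false (fun h => hc h.2)
        have h2 : decide (n ∈ l ∧ s - n ≠ n) = false :=
          decide_eq_false (fun h => hc h.2)
        rw [h1, h2]
    · have hstep : ((if s - n ≠ n then b.insert n (b.getD n [] ++ [s - n]) else b) : PySem.Dict Int (List Int)).contains q
          = b.contains q := by
        by_cases hc : s - n ≠ n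
        · rw [if_pos hc, PySem.Dict.contains_insert]
          have hb : (q == n) = false := by
            simp only [beq_eq_false_iff_ne]
            exact fun h => hnq h.symm
          rw [hb, Bool.false_or]
        · rw [if_neg hc]
      rw [hstep]
      have hiff : (q ∈ n :: l ∧ s - q ≠ q) ↔ (q ∈ l ∧ s - q ≠ q) := by
        constructor
        · rintro ⟨h1, h2⟩
          rcases List.mem_cons.1 h1 with h | h
          · exact absurd h.symm hnq
          · exact ⟨h, h2⟩
        · rintro ⟨h1, h2⟩
          exact ⟨List.mem_cons_of_mem _ h1, h2⟩
      rw [show decide (q ∈ n :: l ∧ s - q ≠ q) = decide (q ∈ l ∧ s - q ≠ q) from by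
        have hb : decide (q = n) = false := decide_eq_false (fun h => hnq h.symm)
        simp [hb]]

-- Effect of B's whole square-enumeration loop on one key of the bucket dictionary.
theorem outer_getD (num q : Int) (hq : 1 ≤ q) : ∀ (R : Nat) (b : PySem.Dict Int (List Int)),
    ((PySem.List.pyRange ((R : Nat) : Int) 1 (-1)).foldl
      (fun b r =>
        (PySem.List.pyRange (max 1 (r * r - num)) (min num (r * r - 1) + 1) 1).foldl
          (fun b n => if r * r - n ≠ n then b.insert n (b.getD n [] ++ [r * r - n]) else b) b)
      b).getD q []
    = b.getD q [] ++ gList num q R := by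
  intro R
  induction R with
  | zero =>
    intro b
    rw [PySem.List.pyRange_neg_one_eq_nil (by norm_num)]
    simp [gList]
  | succ R ih =>
    intro b
    by_cases hR : (1 : Int) < ((R+1 : Nat) : Int)
    · rw [PySem.List.pyRange_neg_one_cons hR, List.foldl_cons]
      have hc : ((R+1 : Nat) : Int) - 1 = ((R : Nat) : Int) := by push_cast; ring
      rw [hc, ih]
      rw [inner_getD _ _ _ (PySem.List.nodup_pyRange_one _ _)]
      rw [gList]
      have hmem : (q ∈ PySem.List.pyRange
            (max 1 (((R+1 : Nat) : Int) * ((R+1 : Nat) : Int) - num))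
            (min num (((R+1 : Nat) : Int) * ((R+1 : Nat) : Int) - 1) + 1) 1
          ∧ ((R+1 : Nat) : Int) * ((R+1 : Nat) : Int) - q ≠ q)
          ↔ (max 1 (((R+1 : Nat) : Int) * ((R+1 : Nat) : Int) - num) ≤ q ∧
             q < min num (((R+1 : Nat) : Int) * ((R+1 : Nat) : Int) - 1) + 1 ∧
             ((R+1 : Nat) : Int) * ((R+1 : Nat) : Int) - q ≠ q) := by
        rw [PySem.List.mem_pyRange_one]
        tauto
      rw [List.append_assoc]
      congr 1
      by_cases hm : max 1 (((R+1 : Nat) : Int) * ((R+1 : Nat) : Int) - num) ≤ q ∧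
          q < min num (((R+1 : Nat) : Int) * ((R+1 : Nat) : Int) - 1) + 1 ∧
          ((R+1 : Nat) : Int) * ((R+1 : Nat) : Int) - q ≠ q
      · rw [if_pos (hmem.2 hm), if_pos hm]
      · rw [if_neg (fun h => hm (hmem.1 h)), if_neg hm, List.nil_append]
    · have hR0 : R = 0 := by omega
      subst hR0
      rw [PySem.List.pyRange_neg_one_eq_nil (by norm_num)]
      have hcond : ¬ (max 1 (((0+1 : Nat) : ℤ) * ((0+1 : Nat) : ℤ) - num) ≤ q ∧
          q < min num (((0+1 : Nat) : ℤ) * ((0+1 : Nat) : ℤ) - 1) + 1 ∧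
          ((0+1 : Nat) : ℤ) * ((0+1 : Nat) : ℤ) - q ≠ q) := by
        rintro ⟨-, h2, -⟩
        have : ((0+1 : Nat) : ℤ) = 1 := by norm_num
        rw [this] at h2
        omega
      rw [gList, if_neg hcond]
      simp [gList]

theorem outer_contains (num q : Int) : ∀ (R : Nat) (b : PySem.Dict Int (List Int)),
    ((PySem.List.pyRange ((R : Nat) : Int) 1 (-1)).foldl
      (fun b r =>
        (PySem.List.pyRange (max 1 (r * r - num)) (min num (r * r - 1) + 1) 1).foldl
          (fun b n => if r * r - n ≠ n then b.insert n (b.getD n [] ++ [r * r - n]) else b) b)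
      b).contains q
    = (b.contains q || decide (gList num q R ≠ [])) := by
  intro R
  induction R with
  | zero =>
    intro b
    rw [PySem.List.pyRange_neg_one_eq_nil (by norm_num)]
    simp [gList]
  | succ R ih =>
    intro b
    by_cases hR : (1 : Int) < ((R+1 : Nat) : Int)
    · rw [PySem.List.pyRange_neg_one_cons hR, List.foldl_cons]
      have hc : ((R+1 : Nat) : Int) - 1 = ((R : Nat) : Int) := by push_cast; ring
      rw [hc, ih, inner_contains, gList]
      have hmem : (q ∈ PySem.List.pyRange
            (max 1 (((R+1 : Nat) : Int) * ((R+1 : Nat) : Int) - num))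
            (min num (((R+1 : Nat) : Int) * ((R+1 : Nat) : Int) - 1) + 1) 1
          ∧ ((R+1 : Nat) : Int) * ((R+1 : Nat) : Int) - q ≠ q)
          ↔ (max 1 (((R+1 : Nat) : Int) * ((R+1 : Nat) : Int) - num) ≤ q ∧
             q < min num (((R+1 : Nat) : Int) * ((R+1 : Nat) : Int) - 1) + 1 ∧
             ((R+1 : Nat) : Int) * ((R+1 : Nat) : Int) - q ≠ q) := by
        rw [PySem.List.mem_pyRange_one]
        tauto
      by_cases hm : max 1 (((R+1 : Nat) : Int) * ((R+1 : Nat) : Int) - num) ≤ q ∧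
          q < min num (((R+1 : Nat) : Int) * ((R+1 : Nat) : Int) - 1) + 1 ∧
          ((R+1 : Nat) : Int) * ((R+1 : Nat) : Int) - q ≠ q
      · rw [if_pos hm, decide_eq_true (hmem.2 hm)]
        simp
      · rw [if_neg hm, List.nil_append,
          decide_eq_false (fun h => hm (hmem.1 h))]
        simp
    · have hR0 : R = 0 := by omega
      subst hR0
      rw [PySem.List.pyRange_neg_one_eq_nil (by norm_num)]
      by_cases hcond : max 1 (((0+1 : Nat) : ℤ) * ((0+1 : Nat) : ℤ) - num) ≤ q ∧
          q < min num (((0+1 : Nat) : ℤ) * ((0+1 : Nat) : ℤ) - 1) + 1 ∧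
          ((0+1 : Nat) : ℤ) * ((0+1 : Nat) : ℤ) - q ≠ q
      · exfalso
        obtain ⟨h1, h2, -⟩ := hcond
        have : ((0+1 : Nat) : ℤ) = 1 := by norm_num
        rw [this] at h1 h2
        omega
      · rw [gList, if_neg hcond]
        simp [gList]

-- Radii above isqrt(n + num) contribute nothing to the bucket of n.
theorem gList_high (num n : Int) : ∀ (R : Nat),
    Nat.sqrt (n + num).toNat ≤ R →
    gList num n R = gList num n (Nat.sqrt (n + num).toNat) := by
  intro R
  induction R with
  | zero =>
    intro h
    have h0 : Nat.sqrt (n + num).toNat = 0 := by omega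
    rw [h0]
  | succ R ih =>
    intro h
    rcases Nat.lt_or_ge R (Nat.sqrt (n + num).toNat) with hlt | hge
    · have : Nat.sqrt (n + num).toNat = R + 1 := by omega
      rw [this]
    · have hbig : (n + num).toNat < (R+1) ^ 2 := Nat.sqrt_lt'.mp (by omega)
      have hbigZ : n + num < ((R+1 : Nat) : ℤ) * ((R+1 : Nat) : ℤ) := by
        have h1 : ((n + num).toNat : ℤ) < (((R+1) ^ 2 : Nat) : ℤ) := by exact_mod_cast hbig
        have h2 : (((R+1) ^ 2 : Nat) : ℤ) = ((R+1 : Nat) : ℤ) * ((R+1 : Nat) : ℤ) := by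
          push_cast; ring
        omega
      rw [gList, if_neg (by omega), List.nil_append]
      exact ih hge

-- A number n at or above the current square gets nothing from it or smaller squares.
theorem gList_nil (num n : Int) : ∀ (r : Nat),
    ((r : Nat) : ℤ) * ((r : Nat) : ℤ) ≤ n → gList num n r = [] := by
  intro r
  induction r with
  | zero => intro _; rfl
  | succ r ih =>
    intro h
    have hmono : ((r : Nat) : ℤ) * ((r : Nat) : ℤ) ≤ ((r+1 : Nat) : ℤ) * ((r+1 : Nat) : ℤ) := by
      have h0 : (0:ℤ) ≤ ((r : Nat) : ℤ) := by positivity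
      have h1 : ((r : Nat) : ℤ) ≤ ((r+1 : Nat) : ℤ) := by push_cast; omega
      nlinarith
    rw [gList, if_neg (by omega), List.nil_append]
    exact ih (by omega)

-- Below isqrt(n + num) the bucket recursion coincides with A's square walk.
theorem gList_eq_specList (num n : Int) (hn : 1 ≤ n) (hn2 : n ≤ num) : ∀ (r : Nat),
    ((r : Nat) : ℤ) * ((r : Nat) : ℤ) ≤ n + num → gList num n r = specList n r := by
  intro r
  induction r with
  | zero => intro _; rfl
  | succ r ih =>
    intro h
    have hpow : ((r+1 : Nat) : ℤ) ^ 2 = ((r+1 : Nat) : ℤ) * ((r+1 : Nat) : ℤ) := by ring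
    have hmono : ((r : Nat) : ℤ) * ((r : Nat) : ℤ) ≤ ((r+1 : Nat) : ℤ) * ((r+1 : Nat) : ℤ) := by
      have h0 : (0:ℤ) ≤ ((r : Nat) : ℤ) := by positivity
      have h1 : ((r : Nat) : ℤ) ≤ ((r+1 : Nat) : ℤ) := by push_cast; omega
      nlinarith
    rw [gList, specList, hpow]
    by_cases hlt : n < ((r+1 : Nat) : ℤ) * ((r+1 : Nat) : ℤ)
    · rw [if_pos hlt, ih (by omega)]
      congr 1
      by_cases hd : ((r+1 : Nat) : ℤ) * ((r+1 : Nat) : ℤ) - n ≠ n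
      · rw [if_pos ⟨by omega, by omega, hd⟩, if_pos hd]
      · rw [if_neg (by rintro ⟨-, -, h3⟩; exact hd h3), if_neg hd]
    · rw [if_neg hlt, if_neg (by rintro ⟨-, h2, -⟩; omega), List.nil_append]
      exact gList_nil num n r (by omega)

theorem nodup_pyRange_down (a b : Int) : (PySem.List.pyRange a b (-1)).Nodup := by
  rw [PySem.List.pyRange_neg_one]
  exact (List.nodup_range).map (fun x y h => by omega)

-- The output fold: A's per-key walk against B's bucket lookup, over fresh keys.
theorem fold_final (num : Int) (B0 : PySem.Dict Int (List Int))
    (hB : ∀ n, 1 ≤ n → n ≤ num → B0.getD n [] = aList n (Int.sqrt (n + num) ^ 2))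
    (hBc : ∀ n, 1 ≤ n → n ≤ num →
      B0.contains n = decide (aList n (Int.sqrt (n + num) ^ 2) ≠ [])) :
    ∀ (l : List Int), l.Nodup → (∀ n ∈ l, 1 ≤ n ∧ n ≤ num) →
    ∀ (d : PySem.Dict Int (List Int)), (∀ n ∈ l, d.contains n = false) →
    l.foldl (fun d n => aInnerD n (Int.sqrt (n + num) ^ 2) d) d =
    l.foldl (fun d n => if B0.contains n then d.insert n (B0.getD n []) else d) d := by
  intro l
  induction l with
  | nil => intro _ _ d _; rfl
  | cons n l ih =>
    intro hnd hrange d hfresh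
    obtain ⟨hn1, hn2⟩ := hrange n List.mem_cons_self
    have hc := hfresh n List.mem_cons_self
    have hnd' := List.nodup_cons.1 hnd
    rw [List.foldl_cons, List.foldl_cons, aInnerD_eq_aList,
      PySem.Dict.getD_of_not_contains d [] hc, List.nil_append,
      hBc n hn1 hn2, hB n hn1 hn2]
    by_cases hL : aList n (Int.sqrt (n + num) ^ 2) = []
    · rw [if_pos hL, if_neg (by simp [hL])]
      exact ih hnd'.2 (fun m hm => hrange m (List.mem_cons_of_mem _ hm)) d
        (fun m hm => hfresh m (List.mem_cons_of_mem _ hm))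
    · rw [if_neg hL, if_pos (by simp [hL])]
      apply ih hnd'.2 (fun m hm => hrange m (List.mem_cons_of_mem _ hm))
      intro m hm
      rw [PySem.Dict.contains_insert]
      have hmn : ¬ (m = n) := fun h => hnd'.1 (h ▸ hm)
      simp [hmn, hfresh m (List.mem_cons_of_mem _ hm)]

-- ===== VERDICT (by name: the statement is the Claim_ definition above) =====
theorem square_sums_spec : Claim_equal_square_sums := by
  intro num _
  unfold Spec_square_sums square_sums square_sums_alt
  simp only []
  apply congrArg PySem.Dict.items
  have hRN : Int.sqrt (max (num + num) 0) =
      ((Nat.sqrt (max (num + num) 0).toNat : Nat) : Int) := rfl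
  rw [hRN]
  apply fold_final
  · -- the bucket of n is exactly A's list for n
    intro n hn1 hn2
    rw [outer_getD num n hn1, PySem.Dict.getD_empty, List.nil_append]
    have hr0le : Nat.sqrt (n + num).toNat ≤ Nat.sqrt (max (num + num) 0).toNat :=
      Nat.sqrt_le_sqrt (by omega)
    rw [gList_high num n _ hr0le]
    have hsq : Nat.sqrt (n + num).toNat ^ 2 ≤ (n + num).toNat := Nat.sqrt_le' _
    have hle : ((Nat.sqrt (n + num).toNat : Nat) : ℤ) * ((Nat.sqrt (n + num).toNat : Nat) : ℤ)
        ≤ n + num := by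
      have h1 : ((Nat.sqrt (n + num).toNat ^ 2 : Nat) : ℤ) ≤ ((n + num).toNat : ℤ) := by
        exact_mod_cast hsq
      have h2 : ((Nat.sqrt (n + num).toNat ^ 2 : Nat) : ℤ)
          = ((Nat.sqrt (n + num).toNat : Nat) : ℤ) * ((Nat.sqrt (n + num).toNat : Nat) : ℤ) := by
        push_cast; ring
      omega
    rw [gList_eq_specList num n hn1 hn2 _ hle]
    have hcast : Int.sqrt (n + num) ^ 2 = ((Nat.sqrt (n + num).toNat : Nat) : Int) ^ 2 := rfl
    rw [hcast, aList_eq_specList _ _ hn1]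
  · -- the bucket has a key for n exactly when A's list for n is nonempty
    intro n hn1 hn2
    rw [outer_contains num n, PySem.Dict.contains_empty, Bool.false_or]
    have hr0le : Nat.sqrt (n + num).toNat ≤ Nat.sqrt (max (num + num) 0).toNat :=
      Nat.sqrt_le_sqrt (by omega)
    rw [gList_high num n _ hr0le]
    have hsq : Nat.sqrt (n + num).toNat ^ 2 ≤ (n + num).toNat := Nat.sqrt_le' _
    have hle : ((Nat.sqrt (n + num).toNat : Nat) : ℤ) * ((Nat.sqrt (n + num).toNat : Nat) : ℤ)
        ≤ n + num := by
      have h1 : ((Nat.sqrt (n + num).toNat ^ 2 : Nat) : ℤ) ≤ ((n + num).toNat : ℤ) := by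
        exact_mod_cast hsq
      have h2 : ((Nat.sqrt (n + num).toNat ^ 2 : Nat) : ℤ)
          = ((Nat.sqrt (n + num).toNat : Nat) : ℤ) * ((Nat.sqrt (n + num).toNat : Nat) : ℤ) := by
        push_cast; ring
      omega
    rw [gList_eq_specList num n hn1 hn2 _ hle]
    have hcast : Int.sqrt (n + num) ^ 2 = ((Nat.sqrt (n + num).toNat : Nat) : Int) ^ 2 := rfl
    rw [hcast, aList_eq_specList _ _ hn1]
  · exact nodup_pyRange_down num 0
  · intro n hn
    have := (PySem.List.mem_pyRange_neg_one).1 hn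
    omega
  · intro n _
    exact PySem.Dict.contains_empty n
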